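-- pv_equiv track=rewrite | github.com/liet-codes/groovy-commutator-research | experiments/exp5_equivalence_table.py | detect_periodicity
-- ===== SOURCE A (Python) =====
-- def detect_periodicity(series, max_period=50):
--     """Detect periodicity in a binary series. Returns period or 0 for aperiodic."""
--     if len(series) < 10:
--         return 0
--     # Check if all zero
--     if all(s == 0 for s in series):
--         return 1  # trivially periodic
--
--     for p in range(1, min(max_period, len(series)//3)):
--         is_periodic = True
--         for i in range(p, min(3*p, len(series))):
--             if series[i] != series[i % p]:
--                 is_periodic = False
--                 break
--         if is_periodic:
--             return p
--     return 0  # aperiodic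
-- ===== SOURCE B (Python) =====
-- def detect_periodicity(series, max_period=50):
--     """Detect periodicity via a Z-function (prefix lcp array) computed once."""
--     n = len(series)
--     if n < 10:
--         return 0
--     if all(s == 0 for s in series):
--         return 1
--     # z[i] = length of the longest common prefix of series and series[i:]
--     z = [0] * n
--     l = r = 0
--     for i in range(1, n):
--         if i < r:
--             z[i] = min(r - i, z[i - l])
--         while i + z[i] < n and series[z[i]] == series[i + z[i]]:
--             z[i] += 1
--         if i + z[i] > r:
--             l, r = i, i + z[i]
--     # period p is reported by A iff the prefix of length min(3p, n) repeats
--     # with period p, i.e. z[p] >= min(2p, n - p)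
--     for p in range(1, min(max_period, n // 3)):
--         if z[p] >= min(2 * p, n - p):
--             return p
--     return 0
-- ===== Notes on version B (the rewrite author's own statement) =====
-- stated objective: alternative
-- what changed: Replaces A's nested per-period rescan with modulo indexing by a Z-function (two-pointer longest-common-prefix array) computed once, after which each candidate period p is tested by the single comparison z[p] >= min(2p, n-p).
import Mathlib
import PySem

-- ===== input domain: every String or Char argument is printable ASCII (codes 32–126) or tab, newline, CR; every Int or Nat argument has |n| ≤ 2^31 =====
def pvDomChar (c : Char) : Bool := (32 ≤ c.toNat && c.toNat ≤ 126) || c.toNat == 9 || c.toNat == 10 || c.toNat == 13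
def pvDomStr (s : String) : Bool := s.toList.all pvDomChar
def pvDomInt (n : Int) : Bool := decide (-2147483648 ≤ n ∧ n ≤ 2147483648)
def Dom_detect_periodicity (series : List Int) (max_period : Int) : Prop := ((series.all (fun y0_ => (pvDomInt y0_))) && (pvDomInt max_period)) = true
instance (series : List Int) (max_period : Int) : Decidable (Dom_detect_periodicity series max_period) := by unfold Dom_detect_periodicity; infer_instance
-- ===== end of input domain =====

-- B replaces A's per-period rescan by a Z-function computed once; each candidate period is then a single array comparison (alternative algorithm, not measured faster).

-- ===== PORT A =====
-- inner 'for i in range(p, min(3*p, len(series)))' with break: the break only falsifies the flag, so it is `all`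
def pvAInner (series : List Int) (n p : Int) : Bool :=
  (PySem.List.pyRange p (min (3 * p) n) 1).all
    (fun i => PySem.List.pyGetD series i 0 == PySem.List.pyGetD series (PySem.Int.mod i p) 0)

-- 'for p in range(...): if is_periodic: return p' / 'return 0'
def pvALoop (series : List Int) (n : Int) : List Int → Int
  | [] => 0
  | p :: rest => if pvAInner series n p then p else pvALoop series n rest

def detect_periodicity (series : List Int) (max_period : Int) : Int :=
  let n : Int := series.length
  if n < 10 then 0
  else if series.all (fun s => s == 0) then 1
  else pvALoop series n (PySem.List.pyRange 1 (min max_period (PySem.Int.floordiv n 3)) 1)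

-- ===== PORT B =====
-- 'while i + z[i] < n and series[z[i]] == series[i + z[i]]: z[i] += 1'  (indices provably in range; pyGetD default never read)
def pvZExt (series : List Int) (n i : Int) (zi : Int) : Int :=
  if h : i + zi < n ∧ PySem.List.pyGetD series zi 0 = PySem.List.pyGetD series (i + zi) 0
  then pvZExt series n i (zi + 1)
  else zi
termination_by (n - i - zi).toNat
decreasing_by omega

-- one iteration of 'for i in range(1, n)' of the Z-function, state (z, l, r)
def pvZStep (series : List Int) (n : Int) (st : List Int × Int × Int) (i : Int) : List Int × Int × Int :=
  let z := st.1
  let l := st.2.1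
  let r := st.2.2
  let zi0 : Int := if i < r then min (r - i) (PySem.List.pyGetD z (i - l) 0) else PySem.List.pyGetD z i 0
  let zi := pvZExt series n i zi0
  let z' := PySem.List.pySetD z i zi
  if i + zi > r then (z', i, i + zi) else (z', l, r)

-- 'for p in range(...): if z[p] >= min(2*p, n-p): return p' / 'return 0'
def pvBLoop (z : List Int) (n : Int) : List Int → Int
  | [] => 0
  | p :: rest => if min (2 * p) (n - p) ≤ PySem.List.pyGetD z p 0 then p else pvBLoop z n rest

def detect_periodicity_alt (series : List Int) (max_period : Int) : Int :=
  let n : Int := series.length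
  if n < 10 then 0
  else if series.all (fun s => s == 0) then 1
  else
    let st := (PySem.List.pyRange 1 n 1).foldl (pvZStep series n) (List.replicate series.length 0, 0, 0)
    pvBLoop st.1 n (PySem.List.pyRange 1 (min max_period (PySem.Int.floordiv n 3)) 1)

-- ===== PRECONDITION & SPEC =====
def Spec_detect_periodicity (series : List Int) (max_period : Int) (out : Int) : Prop := out = detect_periodicity_alt series max_period
instance (series : List Int) (max_period : Int) (out : Int) : Decidable (Spec_detect_periodicity series max_period out) := by unfold Spec_detect_periodicity; infer_instance

-- ===== CLAIM (what is proved, stated in full; the proofs are below) =====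
def Claim_equal_detect_periodicity : Prop := ∀ (series : List Int) (max_period : Int), Dom_detect_periodicity series max_period → Spec_detect_periodicity series max_period (detect_periodicity series max_period)

-- ===== LEMMAS AND PROOFS =====

-- length of the longest common prefix of two lists (specification for the Z-function)
def pvLcp : List Int → List Int → Nat
  | a :: as, b :: bs => if a = b then pvLcp as bs + 1 else 0
  | _, _ => 0

-- z[i] specification: longest common prefix of s and s[i:]
def pvZf (s : List Int) (i : Nat) : Nat := pvLcp s (s.drop i)

lemma pvLcp_le_right : ∀ (a b : List Int), pvLcp a b ≤ b.length := by
  intro a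
  induction a with
  | nil => intro b; simp [pvLcp]
  | cons x xs ih =>
    intro b
    cases b with
    | nil => simp [pvLcp]
    | cons y ys =>
      simp only [pvLcp, List.length_cons]
      split
      · exact Nat.succ_le_succ (ih ys)
      · omega

lemma pvLcp_iff_ge : ∀ (a b : List Int) (k : Nat),
    (k ≤ pvLcp a b ↔ k ≤ a.length ∧ k ≤ b.length ∧ ∀ j < k, a.getD j 0 = b.getD j 0) := by
  intro a
  induction a with
  | nil =>
    intro b k
    simp only [pvLcp, List.length_nil]
    constructor
    · intro h; refine ⟨h, by omega, by omega⟩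
    · intro h; omega
  | cons x xs ih =>
    intro b k
    cases b with
    | nil =>
      constructor
      · intro h
        simp only [pvLcp] at h
        refine ⟨by omega, by simpa using h, by omega⟩
      · intro ⟨_, h, _⟩; simp at h; simp [pvLcp, h]
    | cons y ys =>
      cases k with
      | zero => simp
      | succ k' =>
        simp only [pvLcp, List.length_cons]
        constructor
        · intro h
          have hxy : x = y := by by_contra hne; simp [hne] at h
          subst hxy
          simp only [if_true] at h
          have := (ih ys k').1 (by omega)
          refine ⟨by omega, by omega, ?_⟩
          intro j hj
          cases j with
          | zero => simp
          | succ j' => simpa using this.2.2 j' (by omega)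
        · intro ⟨h1, h2, h3⟩
          have hxy : x = y := by simpa using h3 0 (by omega)
          subst hxy
          simp only [if_true]
          have : k' ≤ pvLcp xs ys := by
            refine (ih ys k').2 ⟨by omega, by omega, ?_⟩
            intro j hj
            simpa using h3 (j + 1) (by omega)
          omega

lemma getD_drop (s : List Int) (i j : Nat) : (s.drop i).getD j 0 = s.getD (i + j) 0 := by
  simp [List.getD_eq_getElem?_getD, List.getElem?_drop]

lemma pvZf_le (s : List Int) (i : Nat) : pvZf s i ≤ s.length - i := by
  have := pvLcp_le_right s (s.drop i)
  simpa [pvZf] using this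

-- the working characterization of pvZf (for i ≤ length)
lemma pvZf_iff (s : List Int) (i k : Nat) (hi : i ≤ s.length) :
    k ≤ pvZf s i ↔ i + k ≤ s.length ∧ ∀ j < k, s.getD j 0 = s.getD (i + j) 0 := by
  rw [pvZf, pvLcp_iff_ge]
  constructor
  · intro ⟨h1, h2, h3⟩
    refine ⟨by simp at h2; omega, ?_⟩
    intro j hj
    have := h3 j hj
    rwa [getD_drop] at this
  · intro ⟨h1, h2⟩
    refine ⟨by omega, by simp; omega, ?_⟩
    intro j hj
    rw [getD_drop]
    exact h2 j hj

lemma pvZf_matches (s : List Int) (i : Nat) (hi : i ≤ s.length) :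
    ∀ j < pvZf s i, s.getD j 0 = s.getD (i + j) 0 :=
  ((pvZf_iff s i (pvZf s i) hi).1 le_rfl).2

-- the while loop computes pvZf from any valid seed
lemma pvZExt_correct (s : List Int) (i k : Nat) (hi : i ≤ s.length) (hk : k ≤ pvZf s i) :
    pvZExt s s.length i k = (pvZf s i : Int) := by
  have hfin : pvZf s i ≤ s.length - i := pvZf_le s i
  by_cases hlt : k < pvZf s i
  · have hcond : (i : Int) + k < s.length ∧
        PySem.List.pyGetD s (k : Int) 0 = PySem.List.pyGetD s ((i : Int) + k) 0 := by
      constructor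
      · omega
      · have := pvZf_matches s i hi k hlt
        have hik : (i : Int) + k = ((i + k : Nat) : Int) := by push_cast; ring
        rw [hik, PySem.List.pyGetD_natCast, PySem.List.pyGetD_natCast]
        exact this
    rw [pvZExt, dif_pos hcond]
    have : ((k : Int) + 1) = ((k + 1 : Nat) : Int) := by push_cast; ring
    rw [this]
    exact pvZExt_correct s i (k + 1) hi (by omega)
  · have hk' : k = pvZf s i := by omega
    subst hk'
    rw [pvZExt]
    rw [dif_neg]
    intro ⟨h1, h2⟩
    have : pvZf s i + 1 ≤ pvZf s i := by
      refine (pvZf_iff s i (pvZf s i + 1) hi).2 ⟨by omega, ?_⟩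
      intro j hj
      by_cases hjz : j < pvZf s i
      · exact pvZf_matches s i hi j hjz
      · have hje : j = pvZf s i := by omega
        subst hje
        have hik : (i : Int) + (pvZf s i : Int) = ((i + pvZf s i : Nat) : Int) := by push_cast; ring
        rw [hik, PySem.List.pyGetD_natCast, PySem.List.pyGetD_natCast] at h2
        exact h2
    omega
termination_by pvZf s i - k

-- invariant of the Z-function main loop after indices 1..i0-1 have been processed
def pvZInv (s : List Int) (i0 : Nat) (st : List Int × Int × Int) : Prop :=
  st.1.length = s.length ∧
  (∀ j : Nat, 1 ≤ j → j < i0 → st.1.getD j 0 = (pvZf s j : Int)) ∧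
  (∀ j : Nat, i0 ≤ j → st.1.getD j 0 = 0) ∧
  ((st.2.1 = 0 ∧ st.2.2 = 0) ∨
    (1 ≤ st.2.1 ∧ st.2.1 < (i0 : Int) ∧ st.2.2 = st.2.1 + (pvZf s st.2.1.toNat : Int) ∧
      st.2.2 ≤ (s.length : Int)))

lemma pvZStep_correct (s : List Int) (i : Nat) (st : List Int × Int × Int)
    (h1 : 1 ≤ i) (h2 : i < s.length) (hInv : pvZInv s i st) :
    pvZInv s (i + 1) (pvZStep s s.length st (i : Int)) := by
  obtain ⟨hlen, hdone, hzero, hlr⟩ := hInv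
  obtain ⟨z, l, r⟩ := st
  simp only at hlen hdone hzero hlr
  -- the seed is a nonnegative Nat k0 with k0 ≤ pvZf s i
  have hseed : ∃ k0 : Nat, k0 ≤ pvZf s i ∧
      (if (i : Int) < r then min (r - i) (PySem.List.pyGetD z ((i : Int) - l) 0)
       else PySem.List.pyGetD z (i : Int) 0) = (k0 : Int) := by
    by_cases hir : (i : Int) < r
    · rcases hlr with ⟨hl0, hr0⟩ | ⟨hl1, hli, hre, hrn⟩
      · exfalso; omega
      · -- l ≥ 1, l < i, r = l + Zf l, r ≤ n
        set lN := l.toNat with hlN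
        have hlval : l = (lN : Int) := by omega
        have hil : (i : Int) - l = ((i - lN : Nat) : Int) := by omega
        have hil1 : 1 ≤ i - lN := by omega
        have hili : i - lN < i := by omega
        have hzil : PySem.List.pyGetD z ((i : Int) - l) 0 = (pvZf s (i - lN) : Int) := by
          rw [hil, PySem.List.pyGetD_natCast]
          exact hdone (i - lN) hil1 (by omega)
        set rN := r.toNat with hrN
        have hrval : r = (rN : Int) := by omega
        have hrZ : rN = lN + pvZf s lN := by omega
        have hrn' : rN ≤ s.length := by omega
        refine ⟨min (rN - i) (pvZf s (i - lN)), ?_, ?_⟩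
        · -- seed validity: min (r-i) (Zf (i-l)) ≤ Zf i
          refine (pvZf_iff s i _ (by omega)).2 ⟨by omega, ?_⟩
          intro j hj
          have hj1 : j < pvZf s (i - lN) := by omega
          have e1 : s.getD j 0 = s.getD ((i - lN) + j) 0 :=
            pvZf_matches s (i - lN) (by omega) j hj1
          have hj2 : (i - lN) + j < pvZf s lN := by omega
          have e2 : s.getD ((i - lN) + j) 0 = s.getD (lN + ((i - lN) + j)) 0 :=
            pvZf_matches s lN (by omega) _ hj2
          have : lN + ((i - lN) + j) = i + j := by omega
          rw [e1, e2, this]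
        · rw [if_pos hir, hzil]
          omega
    · refine ⟨0, by omega, ?_⟩
      rw [if_neg hir]
      have := hzero i (le_refl i)
      simpa [PySem.List.pyGetD_natCast] using this
  obtain ⟨k0, hk0, hseedeq⟩ := hseed
  have hext : pvZExt s s.length (i : Int)
      (if (i : Int) < r then min (r - i) (PySem.List.pyGetD z ((i : Int) - l) 0)
       else PySem.List.pyGetD z (i : Int) 0) = (pvZf s i : Int) := by
    rw [hseedeq]
    exact pvZExt_correct s i k0 (by omega) hk0
  have hzfle : pvZf s i ≤ s.length - i := pvZf_le s i
  have hset : ∀ (m : Nat),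
      (PySem.List.pySetD z (i : Int) ((pvZf s i : Nat) : Int)).getD m 0 =
      if m = i then ((pvZf s i : Nat) : Int) else z.getD m 0 := by
    intro m
    have := PySem.List.pyGetD_pySetD_natCast (xs := z) (n := i) (v := ((pvZf s i : Nat) : Int))
      (m := m) (d := 0) (by omega)
    simp only [PySem.List.pyGetD_natCast] at this
    rw [this]
  have hgd : ∀ j : Nat, 1 ≤ j → j < i + 1 →
      (PySem.List.pySetD z (i : Int) ((pvZf s i : Nat) : Int)).getD j 0 = ((pvZf s j : Nat) : Int) := by
    intro j hj1 hj2
    rw [hset j]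
    by_cases hji : j = i
    · simp [hji]
    · rw [if_neg hji]
      exact hdone j hj1 (by omega)
  have hgz : ∀ j : Nat, i + 1 ≤ j →
      (PySem.List.pySetD z (i : Int) ((pvZf s i : Nat) : Int)).getD j 0 = 0 := by
    intro j hj
    rw [hset j, if_neg (by omega)]
    exact hzero j (by omega)
  have hlen' : (PySem.List.pySetD z (i : Int) ((pvZf s i : Nat) : Int)).length = s.length := by
    simp [hlen]
  simp only [pvZStep, hext]
  by_cases hgt : r < (i : Int) + ((pvZf s i : Nat) : Int)
  · rw [if_pos hgt]
    unfold pvZInv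
    dsimp only
    refine ⟨hlen', hgd, hgz, Or.inr ⟨by omega, by omega, ?_, by omega⟩⟩
    simp only [Int.toNat_natCast]
  · rw [if_neg hgt]
    unfold pvZInv
    dsimp only
    refine ⟨hlen', hgd, hgz, ?_⟩
    rcases hlr with ⟨hl0, hr0⟩ | ⟨hl1, hli, hre, hrn⟩
    · exfalso; omega
    · exact Or.inr ⟨hl1, by omega, hre, hrn⟩

-- running the loop from index i0 to n preserves and completes the invariant
lemma pvZLoop_inv (s : List Int) : ∀ (i0 : Nat) (st : List Int × Int × Int),
    1 ≤ i0 → i0 ≤ s.length → pvZInv s i0 st →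
    pvZInv s s.length ((PySem.List.pyRange (i0 : Int) (s.length : Int) 1).foldl (pvZStep s s.length) st) := by
  intro i0
  induction' hd : s.length - i0 with d ih generalizing i0
  · intro st h1 h2 hInv
    have : i0 = s.length := by omega
    subst this
    rw [PySem.List.pyRange_one_eq_nil (by omega)]
    simpa using hInv
  · intro st h1 h2 hInv
    rw [PySem.List.pyRange_one_cons (by omega : (i0 : Int) < (s.length : Int))]
    simp only [List.foldl_cons]
    have hstep := pvZStep_correct s i0 st h1 (by omega) hInv
    have : ((i0 : Int) + 1) = ((i0 + 1 : Nat) : Int) := by push_cast; ring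
    rw [this]
    exact ih (i0 + 1) (by omega) (pvZStep s s.length st (i0 : Int)) (by omega) (by omega) hstep

-- the initial state satisfies the invariant at i0 = 1
lemma pvZInit (s : List Int) : pvZInv s 1 (List.replicate s.length 0, 0, 0) := by
  refine ⟨by simp, by omega, ?_, Or.inl ⟨rfl, rfl⟩⟩
  intro j _
  simp [List.getD_eq_getElem?_getD, List.getElem?_replicate]
  split <;> rfl

-- A's inner check ⟺ pvZf s p ≥ 2p, for every candidate p of the range
lemma pvCond_eq (s : List Int) (p : Nat) (hp1 : 1 ≤ p) (hp3 : 3 * p + 3 ≤ s.length) :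
    (pvAInner s (s.length : Int) (p : Int) = true ↔ 2 * p ≤ pvZf s p) := by
  have hmin : min (3 * (p : Int)) (s.length : Int) = 3 * (p : Int) := by omega
  rw [pvAInner, hmin, List.all_eq_true]
  have hmem : ∀ (x : Int), x ∈ PySem.List.pyRange (p : Int) (3 * (p : Int)) 1 ↔
      (p : Int) ≤ x ∧ x < 3 * (p : Int) := fun x => PySem.List.mem_pyRange_one
  constructor
  · intro h
    -- first convert to the Nat-indexed s[i] = s[i % p] statement
    have hP : ∀ i : Nat, p ≤ i → i < 3 * p → s.getD i 0 = s.getD (i % p) 0 := by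
      intro i hi1 hi2
      have := h (i : Int) ((hmem (i : Int)).2 ⟨by omega, by omega⟩)
      rw [PySem.Int.mod_natCast] at this
      simp only [PySem.List.pyGetD_natCast, beq_iff_eq] at this
      exact this
    -- then to s[i] = s[i-p], then to 2p ≤ Zf p
    have hQ : ∀ i : Nat, p ≤ i → i < 3 * p → s.getD i 0 = s.getD (i - p) 0 := by
      intro i hi1 hi2
      by_cases h2 : i < 2 * p
      · have : i % p = i - p := by
          rw [Nat.mod_eq_sub_mod hi1, Nat.mod_eq_of_lt (by omega)]
        rw [← this]; exact hP i hi1 hi2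
      · have e1 : i % p = i - 2 * p := by
          rw [Nat.mod_eq_sub_mod hi1, Nat.mod_eq_sub_mod (by omega), Nat.mod_eq_of_lt (by omega)]
          omega
        have e2 : (i - p) % p = i - 2 * p := by
          rw [Nat.mod_eq_sub_mod (by omega), Nat.mod_eq_of_lt (by omega)]
          omega
        have := hP i hi1 hi2
        have h3 := hP (i - p) (by omega) (by omega)
        rw [e1] at this
        rw [e2, ← e1] at h3
        rw [this, h3, e1]
    refine (pvZf_iff s p (2 * p) (by omega)).2 ⟨by omega, ?_⟩
    intro j hj
    have := hQ (p + j) (by omega) (by omega)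
    simpa using this.symm
  · intro h2p x hx
    obtain ⟨hx1, hx2⟩ := (hmem x).1 hx
    have hx0 : 0 ≤ x := by omega
    set iN := x.toNat with hiN
    have hxeq : x = (iN : Int) := by omega
    have hi1 : p ≤ iN := by omega
    have hi2 : iN < 3 * p := by omega
    -- from 2p ≤ Zf p get s[i] = s[i-p] on [p, 3p), then chain to s[i % p]
    have hQ : ∀ i : Nat, p ≤ i → i < 3 * p → s.getD i 0 = s.getD (i - p) 0 := by
      intro i hi1' hi2'
      have := ((pvZf_iff s p (2 * p) (by omega)).1 h2p).2 (i - p) (by omega)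
      have he : p + (i - p) = i := by omega
      rw [he] at this
      exact this.symm
    have : s.getD iN 0 = s.getD (iN % p) 0 := by
      by_cases hlt : iN < 2 * p
      · have : iN % p = iN - p := by
          rw [Nat.mod_eq_sub_mod hi1, Nat.mod_eq_of_lt (by omega)]
        rw [this]; exact hQ iN hi1 hi2
      · have e1 : iN % p = iN - 2 * p := by
          rw [Nat.mod_eq_sub_mod hi1, Nat.mod_eq_sub_mod (by omega), Nat.mod_eq_of_lt (by omega)]
          omega
        have h3 := hQ iN hi1 hi2
        have h4 := hQ (iN - p) (by omega) (by omega)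
        rw [e1, h3, h4]
        congr 1
        omega
    rw [hxeq, PySem.Int.mod_natCast]
    simp only [PySem.List.pyGetD_natCast, beq_iff_eq]
    exact this

-- the two selection loops agree when their per-candidate tests agree
lemma pvLoop_eq (s : List Int) (z : List Int) (n : Int) :
    ∀ (ps : List Int), (∀ p ∈ ps, (pvAInner s n p = true ↔ min (2 * p) (n - p) ≤ PySem.List.pyGetD z p 0)) →
    pvALoop s n ps = pvBLoop z n ps := by
  intro ps
  induction ps with
  | nil => intro _; rfl
  | cons p rest ih =>
    intro h
    have hp := h p (List.mem_cons_self)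
    simp only [pvALoop, pvBLoop]
    by_cases hc : pvAInner s n p = true
    · rw [if_pos hc, if_pos (hp.1 hc)]
    · rw [if_neg hc, if_neg (fun hz => hc (hp.2 hz))]
      exact ih (fun q hq => h q (List.mem_cons_of_mem p hq))

-- ===== VERDICT (by name: the statement is the Claim_ definition above) =====
theorem detect_periodicity_spec : Claim_equal_detect_periodicity := by
  intro series max_period _
  unfold Spec_detect_periodicity detect_periodicity detect_periodicity_alt
  by_cases h10 : (series.length : Int) < 10
  · simp only [if_pos h10]
  · simp only [if_neg h10]
    by_cases hz : series.all (fun s => s == 0)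
    · simp only [if_pos hz]
    · simp only [if_neg hz]
      -- the computed z array agrees with pvZf on 1 ≤ j < n
      have hinv := pvZLoop_inv series 1 (List.replicate series.length 0, 0, 0)
        (le_refl 1) (by omega) (pvZInit series)
      set st := (PySem.List.pyRange (1 : Int) (series.length : Int) 1).foldl
        (pvZStep series (series.length : Int)) (List.replicate series.length 0, 0, 0) with hst
      have hzarr : ∀ j : Nat, 1 ≤ j → j < series.length → st.1.getD j 0 = (pvZf series j : Int) := by
        have : ((1 : Nat) : Int) = (1 : Int) := by norm_num
        rw [← this] at hinv
        exact hinv.2.1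
      apply pvLoop_eq
      intro p hp
      obtain ⟨hp1, hp2⟩ := PySem.List.mem_pyRange_one.1 hp
      have hple : p < PySem.Int.floordiv (series.length : Int) 3 := by omega
      have hfd : PySem.Int.floordiv (series.length : Int) 3 = ((series.length / 3 : Nat) : Int) := by
        exact_mod_cast PySem.Int.floordiv_natCast series.length 3
      rw [hfd] at hple
      set pN := p.toNat with hpN
      have hpval : p = (pN : Int) := by omega
      have hpN1 : 1 ≤ pN := by omega
      have hpNd : pN < series.length / 3 := by omega
      have hp3 : 3 * pN + 3 ≤ series.length := by omega
      have hzp : PySem.List.pyGetD st.1 p 0 = (pvZf series pN : Int) := by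
        rw [hpval, PySem.List.pyGetD_natCast]
        exact hzarr pN hpN1 (by omega)
      have hmin2 : min (2 * p) ((series.length : Int) - p) = 2 * p := by omega
      rw [hzp, hmin2, hpval]
      rw [pvCond_eq series pN hpN1 hp3]
      constructor
      · intro h; exact_mod_cast (by exact_mod_cast h : (2 * pN : Int) ≤ (pvZf series pN : Int))
      · intro h; exact_mod_cast h
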